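-- pv_equiv track=rewrite | github.com/BishengLi0327/Topology-Restoration-Based-on-GNN | code/build_alarm_graph.py | count_close_time
-- ===== SOURCE A (Python) =====
-- from typing import List
--
-- def count_close_time(t1: List[int], t2: List[int], t_interval: int) -> int:
--     count = 0
--     if not t1 and not t2:
--         return 0
--     for t_a in t1:
--         for t_b in t2:
--             if abs(t_a - t_b) <= t_interval:
--                 count += 1
--     return count
-- ===== SOURCE B (Python) =====
-- def count_close_time(t1, t2, t_interval):
--     # Sort t2 once, then for each element of t1 count the partners in the
--     # closed interval [a - t_interval, a + t_interval] by binary search.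
--     if t_interval < 0:
--         return 0
--     s = sorted(t2)
--     n = len(s)
--
--     def count_lt(x):
--         # number of elements of s strictly below x
--         lo, hi = 0, n
--         while lo < hi:
--             mid = (lo + hi) // 2
--             if s[mid] < x:
--                 lo = mid + 1
--             else:
--                 hi = mid
--         return lo
--
--     total = 0
--     for a in t1:
--         total += count_lt(a + t_interval + 1) - count_lt(a - t_interval)
--     return total
-- ===== Notes on version B (the rewrite author's own statement) =====
-- stated objective: faster
-- what changed: Replaced the nested scan over all (a,b) pairs by sorting t2 once and counting, for each a in t1, the elements in [a-t_interval, a+t_interval] with two hand-written binary searches (negative intervals short-circuit to 0).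
import Mathlib
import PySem

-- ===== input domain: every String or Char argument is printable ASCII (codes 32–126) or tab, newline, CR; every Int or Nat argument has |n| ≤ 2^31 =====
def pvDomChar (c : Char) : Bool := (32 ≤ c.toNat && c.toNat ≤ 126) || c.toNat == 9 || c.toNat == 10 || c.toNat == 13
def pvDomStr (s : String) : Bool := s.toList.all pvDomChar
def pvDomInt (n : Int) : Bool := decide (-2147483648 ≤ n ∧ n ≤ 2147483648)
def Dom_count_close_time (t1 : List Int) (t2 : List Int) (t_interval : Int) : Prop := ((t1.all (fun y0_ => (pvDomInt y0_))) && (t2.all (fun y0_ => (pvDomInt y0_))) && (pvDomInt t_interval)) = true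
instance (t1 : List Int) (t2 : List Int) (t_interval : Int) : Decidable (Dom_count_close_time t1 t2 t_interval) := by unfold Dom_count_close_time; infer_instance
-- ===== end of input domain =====

-- B sorts t2 once and, per element of t1, counts partners in the closed interval
-- with two binary searches: O((n+m) log m) instead of A's O(n*m) nested scan.

-- ===== PORT A =====
def count_close_time (t1 : List Int) (t2 : List Int) (t_interval : Int) : Int :=
  if t1 = [] ∧ t2 = [] then 0
  else
    t1.foldl (fun count t_a =>
      t2.foldl (fun c t_b => if |t_a - t_b| ≤ t_interval then c + 1 else c) count) 0

-- ===== PORT B =====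
-- hand-written binary search (transcription of Source B's count_lt while-loop;
-- the loop shrinks hi - lo by at least 1 per iteration, so fuel = hi - lo bounds it):
-- number of elements of s (sorted) strictly below x, searching in [lo, hi)
def bisectLtGo (s : List Int) (x : Int) : Nat → Nat → Nat → Nat
  | 0, lo, _ => lo
  | fuel + 1, lo, hi =>
    if lo < hi then
      let mid := (lo + hi) / 2
      if s.getD mid 0 < x then bisectLtGo s x fuel (mid + 1) hi   -- mid is always in range
      else bisectLtGo s x fuel lo mid
    else lo

def bisectLt (s : List Int) (x : Int) (lo hi : Nat) : Nat := bisectLtGo s x (hi - lo) lo hi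

def count_close_time_alt (t1 : List Int) (t2 : List Int) (t_interval : Int) : Int :=
  if t_interval < 0 then 0
  else
    let s := PySem.List.sorted t2 (fun x => x) false
    let n := s.length
    t1.foldl (fun total a =>
      total + (bisectLt s (a + t_interval + 1) 0 n : Int)
            - (bisectLt s (a - t_interval) 0 n : Int)) 0

-- ===== PRECONDITION & SPEC =====
def Spec_count_close_time (t1 : List Int) (t2 : List Int) (t_interval : Int) (out : Int) : Prop := out = count_close_time_alt t1 t2 t_interval
instance (t1 : List Int) (t2 : List Int) (t_interval : Int) (out : Int) : Decidable (Spec_count_close_time t1 t2 t_interval out) := by unfold Spec_count_close_time; infer_instance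

-- ===== CLAIM (what is proved, stated in full; the proofs are below) =====
def Claim_equal_count_close_time : Prop := ∀ (t1 : List Int) (t2 : List Int) (t_interval : Int), Dom_count_close_time t1 t2 t_interval → Spec_count_close_time t1 t2 t_interval (count_close_time t1 t2 t_interval)

-- ===== LEMMAS AND PROOFS =====

-- a list split at p into elements < x and elements >= x has countP (. < x) = p
theorem pv_countP_split (s : List Int) (x : Int) (p : Nat)
    (hp : p ≤ s.length)
    (hlt : ∀ i, i < p → s.getD i 0 < x)
    (hge : ∀ i, p ≤ i → i < s.length → ¬ s.getD i 0 < x) :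
    s.countP (fun b => decide (b < x)) = p := by
  induction s generalizing p with
  | nil => simp only [List.length_nil, Nat.le_zero] at hp; simp [hp]
  | cons a l ih =>
    cases p with
    | zero =>
      apply List.countP_eq_zero.2
      intro b hb
      obtain ⟨i, hi, hbe⟩ := List.getElem_of_mem hb
      have := hge i (by omega) hi
      rw [List.getD_eq_getElem _ _ hi, hbe] at this
      simpa using this
    | succ p' =>
      have ha : a < x := by simpa using hlt 0 (by omega)
      rw [List.countP_cons]
      have := ih p' (by simp at hp; omega)
        (fun i hi => by simpa [List.getD_cons_succ] using hlt (i + 1) (by omega))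
        (fun i h1 h2 => by simpa [List.getD_cons_succ] using hge (i + 1) (by omega) (by simp; omega))
      simp [this, ha]

theorem pv_bisectLtGo_eq (s : List Int) (x : Int)
    (hmono : ∀ i j, i ≤ j → j < s.length → s.getD i 0 ≤ s.getD j 0) :
    ∀ (fuel lo hi : Nat), hi - lo ≤ fuel → lo ≤ hi → hi ≤ s.length →
    (∀ i, i < lo → s.getD i 0 < x) →
    (∀ i, hi ≤ i → i < s.length → ¬ s.getD i 0 < x) →
    bisectLtGo s x fuel lo hi = s.countP (fun b => decide (b < x)) := by
  intro fuel
  induction fuel with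
  | zero =>
    intro lo hi hf hlohi hhi hlt hge
    have heq : lo = hi := by omega
    exact (pv_countP_split s x lo (by omega) hlt (fun i h1 h2 => hge i (by omega) h2)).symm
  | succ fuel ih =>
    intro lo hi hf hlohi hhi hlt hge
    rw [bisectLtGo]
    by_cases h : lo < hi
    · rw [if_pos h]
      by_cases hc : s.getD ((lo + hi) / 2) 0 < x
      · rw [if_pos hc]
        exact ih ((lo + hi) / 2 + 1) hi (by omega) (by omega) hhi
          (fun i hi' => lt_of_le_of_lt (hmono i ((lo + hi) / 2) (by omega) (by omega)) hc) hge
      · rw [if_neg hc]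
        exact ih lo ((lo + hi) / 2) (by omega) (by omega) (by omega) hlt
          (fun i h1 h2 hlt' => hc (lt_of_le_of_lt (hmono ((lo + hi) / 2) i h1 h2) hlt'))
    · rw [if_neg h]
      have heq : lo = hi := by omega
      exact (pv_countP_split s x lo (by omega) hlt (fun i h1 h2 => hge i (by omega) h2)).symm

-- A's inner loop adds the count of close partners to the accumulator
theorem pv_inner (l : List Int) (a t : Int) (c : Int) :
    l.foldl (fun c b => if |a - b| ≤ t then c + 1 else c) c
      = c + (l.countP (fun b => decide (|a - b| ≤ t)) : Int) := by
  induction l generalizing c with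
  | nil => simp
  | cons b l ih =>
    simp only [List.foldl_cons, List.countP_cons, ih]
    by_cases h : |a - b| ≤ t
    · simp [h]
      ring
    · simp [h]

-- adding two pointwise-disjoint counts
theorem pv_countP_add {a : Type} (l : List a) (p q r : a → Bool)
    (h : ∀ x, ((if p x = true then 1 else 0) + (if r x = true then 1 else 0) : Nat)
              = if q x = true then 1 else 0) :
    l.countP p + l.countP r = l.countP q := by
  induction l with
  | nil => simp
  | cons b l ih =>
    simp only [List.countP_cons]
    have := h b
    omega

-- interval count = count below upper bound minus count below lower bound (t >= 0)
theorem pv_interval (l : List Int) (a t : Int) (ht : 0 ≤ t) :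
    l.countP (fun b => decide (b < a - t)) + l.countP (fun b => decide (|a - b| ≤ t))
      = l.countP (fun b => decide (b < a + t + 1)) := by
  apply pv_countP_add
  intro b
  simp only [decide_eq_true_eq, abs_le]
  split_ifs <;> omega

theorem pv_countP_zero_of_neg (l : List Int) (a t : Int) (ht : t < 0) :
    l.countP (fun b => decide (|a - b| ≤ t)) = 0 := by
  apply List.countP_eq_zero.2
  intro b _
  simp only [decide_eq_true_eq]
  have := abs_nonneg (a - b)
  omega

-- ===== VERDICT (by name: the statement is the Claim_ definition above) =====
theorem count_close_time_spec : Claim_equal_count_close_time := by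
  intro t1 t2 t _
  unfold Spec_count_close_time count_close_time count_close_time_alt
  set s := PySem.List.sorted t2 (fun x => x) false with hs
  have hperm : s.Perm t2 := PySem.List.sorted_perm t2 (fun x => x) false
  have hmono : ∀ i j, i ≤ j → j < s.length → s.getD i 0 ≤ s.getD j 0 := by
    intro i j hij hj
    rw [List.getD_eq_getElem _ _ (by omega), List.getD_eq_getElem _ _ hj]
    exact PySem.List.sorted_id_getElem_mono t2 hij hj
  have hbis : ∀ x : Int, bisectLt s x 0 s.length = t2.countP (fun b => decide (b < x)) := by
    intro x
    rw [bisectLt, pv_bisectLtGo_eq s x hmono (s.length - 0) 0 s.length (by omega) (by omega) le_rfl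
      (by intro i hi; omega) (by intro i h1 h2; omega)]
    exact hperm.countP_eq _
  by_cases ht : t < 0
  · rw [if_pos ht]
    have hA : ∀ (l : List Int) (c : Int),
        l.foldl (fun count t_a =>
          t2.foldl (fun c t_b => if |t_a - t_b| ≤ t then c + 1 else c) count) c = c := by
      intro l
      induction l with
      | nil => intro c; rfl
      | cons a l ih =>
        intro c
        rw [List.foldl_cons, pv_inner, pv_countP_zero_of_neg t2 a t ht, ih]
        simp
    split
    · rfl
    · exact hA t1 0
  · rw [if_neg ht]
    have ht2 : 0 ≤ t := by omega
    have key : ∀ (l : List Int) (c : Int),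
        l.foldl (fun count t_a =>
          t2.foldl (fun c t_b => if |t_a - t_b| ≤ t then c + 1 else c) count) c
        = l.foldl (fun total a =>
            total + (bisectLt s (a + t + 1) 0 s.length : Int)
                  - (bisectLt s (a - t) 0 s.length : Int)) c := by
      intro l
      induction l with
      | nil => intro c; rfl
      | cons a l ih =>
        intro c
        rw [List.foldl_cons, List.foldl_cons, pv_inner, ih]
        congr 1
        rw [hbis, hbis]
        have := pv_interval t2 a t ht2
        omega
    split
    · rename_i hemp
      rw [hemp.1]
      simp
    · exact key t1 0
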